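-- pv_equiv track=rewrite | github.com/Heng1222/Ohsumed_classification | MeSH_data/create_dataset.py | get_path_components
-- ===== SOURCE A (Python) =====
-- def get_path_components(tree_number):
--     """返回祖先樹狀編號組件的列表。"""
--     if not tree_number:
--         return []
--
--     path = []
--     # 加入根節點 C
--     if tree_number.startswith('C') and tree_number != 'C':
--         path.append('C')
--
--     parts = tree_number.split('.')
--     current_path_parts = []
--     for part in parts:
--         current_path_parts.append(part)
--         path.append(".".join(current_path_parts))
--     # 找 tree_number 往上所有父節點的唯一路徑
--     unique_path = []
--     for p in path:
--         if p not in unique_path: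
--             unique_path.append(p)
--     return unique_path
-- ===== SOURCE B (Python) =====
-- def get_path_components(tree_number):
--     """Return the list of ancestor tree-number path components.
--
--     Different decomposition from the original: ancestors are built
--     top-down (whole path, then repeatedly strip the last segment),
--     back-to-front, then reversed; dedup uses a seen-set.
--     """
--     if not tree_number:
--         return []
--
--     parts = tree_number.split('.')
--     anc = []
--     while parts:
--         anc.append('.'.join(parts))
--         parts = parts[:-1]
--     anc.reverse()
--
--     if tree_number.startswith('C') and tree_number != 'C':
--         anc.insert(0, 'C')
--
--     result = []
--     seen = set()
--     for p in anc:
--         if p not in seen: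
--             seen.add(p)
--             result.append(p)
--     return result
-- ===== Notes on version B (the rewrite author's own statement) =====
-- stated objective: alternative
-- what changed: Ancestor paths are built top-down by repeatedly stripping the last dot-separated segment (back-to-front, then reversed) instead of accumulating parts left-to-right and joining at each step, and the in-order dedup uses a seen-set instead of rescanning the output list.
import Mathlib
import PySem

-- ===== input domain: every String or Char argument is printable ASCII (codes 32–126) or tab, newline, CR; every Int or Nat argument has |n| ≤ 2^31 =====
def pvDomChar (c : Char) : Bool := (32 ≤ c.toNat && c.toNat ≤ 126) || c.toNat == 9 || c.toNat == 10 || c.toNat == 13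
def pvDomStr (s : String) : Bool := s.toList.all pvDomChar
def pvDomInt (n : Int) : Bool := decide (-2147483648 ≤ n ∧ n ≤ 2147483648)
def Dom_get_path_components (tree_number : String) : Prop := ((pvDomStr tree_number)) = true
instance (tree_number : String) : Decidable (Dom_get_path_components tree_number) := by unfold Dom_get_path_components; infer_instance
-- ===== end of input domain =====

-- B builds the ancestor paths top-down (strip the last dot-separated segment repeatedly), back-to-front,
-- then reverses, and dedups with a seen-set — a different decomposition, same return value.

-- ===== PORT A =====
-- 's.split(".")': separator "." is a non-empty literal, so PySem.Str.split? is always `some`;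
-- `.getD []` only discharges the Option and is exact here.
def get_path_components (tree_number : String) : List String :=
  if tree_number = "" then []
  else
    let path0 : List String :=
      if PySem.Str.startswith tree_number "C" && tree_number != "C" then ["C"] else []
    let parts := (PySem.Str.split? tree_number ".").getD []
    -- the for-loop over parts, state = (current_path_parts, path)
    let st := parts.foldl
      (fun (st : List String × List String) part =>
        (st.1 ++ [part], st.2 ++ [PySem.Str.join "." (st.1 ++ [part])]))
      ([], path0)
    -- the dedup loop: membership test against the accumulated unique_path
    st.2.foldl (fun uniq p => if p ∈ uniq then uniq else uniq ++ [p]) []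

-- ===== PORT B =====
-- the 'while parts: anc.append(".".join(parts)); parts = parts[:-1]' loop
def pvAncB : List String → List String
  | [] => []
  | p :: ps => PySem.Str.join "." (p :: ps) :: pvAncB ((p :: ps).dropLast)
termination_by l => l.length
decreasing_by simp

def get_path_components_alt (tree_number : String) : List String :=
  if tree_number = "" then []
  else
    let anc := (pvAncB ((PySem.Str.split? tree_number ".").getD [])).reverse
    let anc :=
      if PySem.Str.startswith tree_number "C" && tree_number != "C" then "C" :: anc else anc
    -- the dedup loop with a seen-set, state = (result, seen)
    (anc.foldl
      (fun (st : List String × PySem.Set String) p =>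
        if p ∈ st.2 then st else (st.1 ++ [p], st.2.add p))
      ([], PySem.Set.ofList [])).1

-- ===== PRECONDITION & SPEC =====
def Spec_get_path_components (tree_number : String) (out : List String) : Prop := out = get_path_components_alt tree_number
instance (tree_number : String) (out : List String) : Decidable (Spec_get_path_components tree_number out) := by unfold Spec_get_path_components; infer_instance

-- ===== CLAIM (what is proved, stated in full; the proofs are below) =====
def Claim_equal_get_path_components : Prop := ∀ (tree_number : String), Dom_get_path_components tree_number → Spec_get_path_components tree_number (get_path_components tree_number)

-- ===== LEMMAS AND PROOFS =====

-- the list of joined non-empty prefixes of ps, each extended on the left by cur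
def pvG (cur : List String) : List String → List String
  | [] => []
  | p :: ps => PySem.Str.join "." (cur ++ [p]) :: pvG (cur ++ [p]) ps

theorem pv_foldA_eq (ps : List String) : ∀ (cur path : List String),
    (ps.foldl
      (fun (st : List String × List String) part =>
        (st.1 ++ [part], st.2 ++ [PySem.Str.join "." (st.1 ++ [part])]))
      (cur, path)).2 = path ++ pvG cur ps := by
  induction ps with
  | nil => intro cur path; simp [pvG]
  | cons p ps ih =>
    intro cur path
    simp only [List.foldl_cons, pvG]
    rw [ih]
    simp

theorem pvG_dropLast (ps : List String) : ∀ (cur : List String), ps ≠ [] →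
    pvG cur ps = pvG cur ps.dropLast ++ [PySem.Str.join "." (cur ++ ps)] := by
  induction ps with
  | nil => intro cur h; exact absurd rfl h
  | cons p ps ih =>
    intro cur _
    cases ps with
    | nil => simp [pvG]
    | cons q qs =>
      rw [List.dropLast_cons₂]
      conv_lhs => rw [pvG]
      conv_rhs => rw [pvG]
      rw [ih (cur ++ [p]) (by simp)]
      simp

theorem pvAncB_eq (ps : List String) : pvAncB ps = (pvG [] ps).reverse := by
  induction ps using pvAncB.induct with
  | case1 => simp [pvAncB, pvG]
  | case2 p ps ih =>
    rw [pvAncB, ih, pvG_dropLast (p :: ps) [] (by simp)]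
    simp

theorem pv_dedup_eq (l : List String) : ∀ (res : List String) (seen : PySem.Set String),
    (∀ x, x ∈ seen ↔ x ∈ res) →
    l.foldl (fun uniq p => if p ∈ uniq then uniq else uniq ++ [p]) res =
      (l.foldl
        (fun (st : List String × PySem.Set String) p =>
          if p ∈ st.2 then st else (st.1 ++ [p], st.2.add p))
        (res, seen)).1 := by
  induction l with
  | nil => intro res seen _; rfl
  | cons p l ih =>
    intro res seen h
    simp only [List.foldl_cons]
    by_cases hp : p ∈ res
    · rw [if_pos hp, if_pos ((h p).mpr hp)]
      exact ih res seen h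
    · rw [if_neg hp, if_neg (fun hs => hp ((h p).mp hs))]
      refine ih (res ++ [p]) (seen.add p) ?_
      intro x
      rw [PySem.Set.mem_add, List.mem_append, List.mem_singleton, h x]

-- ===== VERDICT (by name: the statement is the Claim_ definition above) =====
theorem get_path_components_spec : Claim_equal_get_path_components := by
  intro tree_number _
  unfold Spec_get_path_components get_path_components get_path_components_alt
  by_cases he : tree_number = ""
  · simp [he]
  · rw [if_neg he, if_neg he]
    simp only []
    rw [pv_foldA_eq, pvAncB_eq, List.reverse_reverse]
    by_cases hc : (PySem.Str.startswith tree_number "C" && tree_number != "C") = true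
    · rw [if_pos hc, if_pos hc]
      exact pv_dedup_eq _ [] (PySem.Set.ofList []) (by intro x; simp)
    · rw [if_neg hc, if_neg hc]
      rw [List.nil_append]
      exact pv_dedup_eq _ [] (PySem.Set.ofList []) (by intro x; simp)
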